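-- pv_equiv track=rewrite | github.com/hirosuzuki/GoogleCodeJam2022 | qual/d1000000.py | calc
-- ===== SOURCE A (Python) =====
-- def calc(S):
--     #if len(S) > 20:
--     #    return -1
--     dices = sorted(S)
--     c = 0
--     i = 0
--     while i < len(S):
--         if dices[i] >= c + 1:
--             c += 1
--         i += 1
--     return c
-- ===== SOURCE B (Python) =====
-- def calc(S):
--     cnt = {}
--     for v in S:
--         cnt[v] = cnt.get(v, 0) + 1
--     c = 0
--     for v in sorted(cnt):
--         c += min(cnt[v], max(0, v - c))
--     return c
-- ===== Notes on version B (the rewrite author's own statement) =====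
-- stated objective: alternative
-- what changed: B replaces A's per-die conditional scan over the fully sorted list with a value->count dictionary built in one pass, then a single pass over the sorted DISTINCT values that advances the counter in bulk by min(count, max(0, v - c)).
import Mathlib
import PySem

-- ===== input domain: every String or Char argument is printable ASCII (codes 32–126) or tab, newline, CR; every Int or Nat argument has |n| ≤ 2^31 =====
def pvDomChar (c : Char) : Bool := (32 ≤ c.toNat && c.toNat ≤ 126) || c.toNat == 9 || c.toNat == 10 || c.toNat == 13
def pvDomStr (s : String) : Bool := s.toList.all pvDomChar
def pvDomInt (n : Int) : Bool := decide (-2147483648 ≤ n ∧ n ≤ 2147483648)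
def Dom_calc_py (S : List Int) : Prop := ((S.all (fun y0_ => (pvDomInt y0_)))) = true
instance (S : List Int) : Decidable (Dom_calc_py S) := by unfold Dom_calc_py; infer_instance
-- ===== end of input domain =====

-- B groups dice by value (a counter dict) and advances the greedy counter in one bulk
-- arithmetic step per distinct value, instead of A's per-die scan of the sorted list.

-- ===== PORT A =====
def calc_py (S : List Int) : Int :=
  let dices := PySem.List.sorted S (fun x => x) false
  (PySem.List.pyRange 0 (S.length : Int) 1).foldl
    (fun c i => if PySem.List.pyGetD dices i 0 ≥ c + 1 then c + 1 else c) 0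

-- ===== PORT B =====
def calc_py_alt (S : List Int) : Int :=
  let cnt := S.foldl (fun d x => d.insert x (d.getD x 0 + 1)) PySem.Dict.empty
  (PySem.List.sorted cnt.keys (fun x => x) false).foldl
    (fun c v => c + min (cnt.getD v 0) (max 0 (v - c))) 0

-- ===== PRECONDITION & SPEC =====
def Spec_calc_py (S : List Int) (out : Int) : Prop := out = calc_py_alt S
instance (S : List Int) (out : Int) : Decidable (Spec_calc_py S out) := by unfold Spec_calc_py; infer_instance

-- ===== CLAIM (what is proved, stated in full; the proofs are below) =====
def Claim_equal_calc_py : Prop := ∀ (S : List Int), Dom_calc_py S → Spec_calc_py S (calc_py S)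

-- ===== LEMMAS AND PROOFS =====

-- arithmetic helper for the bulk-step recurrence when the die still counts
theorem push_min_succ (v c : Int) (k : Nat) :
    min ((k : Int) + 1) (v - c) = min ((k : Int)) (v - (c + 1)) + 1 := by
  rw [← min_add_add_right]
  congr 1
  ring

-- A's step on m copies of v advances c by min m (max 0 (v - c))
theorem pv_repl_foldl (m : Nat) (v c : Int) :
    (List.replicate m v).foldl (fun c x => if x ≥ c + 1 then c + 1 else c) c
      = c + min (m : Int) (max 0 (v - c)) := by
  induction m generalizing c with
  | zero =>
    rw [List.replicate_zero, List.foldl_nil, Nat.cast_zero,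
        min_eq_left (le_max_left 0 (v - c)), add_zero]
  | succ k ih =>
    rw [List.replicate_succ, List.foldl_cons]
    by_cases h : v ≥ c + 1
    · rw [if_pos h, ih, max_eq_right (by omega : (0:Int) ≤ v - (c + 1)),
          max_eq_right (by omega : (0:Int) ≤ v - c), Nat.cast_succ, push_min_succ v c k]
      ring
    · rw [if_neg h, ih]
      have h0 : max 0 (v - c) = 0 := max_eq_left (by omega)
      rw [h0, min_eq_right (Int.natCast_nonneg k),
          min_eq_right (Int.natCast_nonneg (k + 1))]

-- grouped fold over distinct values = A's fold over the flattened blocks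
theorem pv_flat_foldl (S K : List Int) (c : Int) :
    (K.flatMap (fun v => List.replicate (S.count v) v)).foldl
        (fun c x => if x ≥ c + 1 then c + 1 else c) c
      = K.foldl (fun c v => c + min ((S.count v : Int)) (max 0 (v - c))) c := by
  induction K generalizing c with
  | nil => rfl
  | cons k K ih =>
    rw [List.flatMap_cons, List.foldl_append, pv_repl_foldl, List.foldl_cons, ih]

theorem pv_count_flat (S K : List Int) (x : Int) (hnd : K.Nodup) :
    (K.flatMap (fun v => List.replicate (S.count v) v)).count x
      = if x ∈ K then S.count x else 0 := by
  induction K with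
  | nil => simp
  | cons k K ih =>
    rw [List.flatMap_cons, List.count_append, List.count_replicate,
        ih (List.Nodup.of_cons hnd)]
    by_cases hxk : x = k
    · subst hxk
      have : x ∉ K := (List.nodup_cons.mp hnd).1
      simp [this]
    · simp [hxk, Ne.symm hxk]

theorem pv_flat_perm (S K : List Int) (hnd : K.Nodup)
    (hm : ∀ x, x ∈ K ↔ x ∈ S) :
    (K.flatMap (fun v => List.replicate (S.count v) v)).Perm S := by
  rw [List.perm_iff_count]
  intro x
  rw [pv_count_flat S K x hnd]
  by_cases hx : x ∈ K
  · simp [hx]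
  · have : x ∉ S := fun h => hx ((hm x).mpr h)
    simp [hx, List.count_eq_zero_of_not_mem this]

theorem pv_flat_pairwise (S K : List Int) (hp : K.Pairwise (· < ·)) :
    (K.flatMap (fun v => List.replicate (S.count v) v)).Pairwise (· ≤ ·) := by
  induction K with
  | nil => simp
  | cons k K ih =>
    rw [List.flatMap_cons, List.pairwise_append]
    refine ⟨List.pairwise_replicate.mpr (Or.inr le_rfl), ih hp.of_cons, ?_⟩
    intro a ha b hb
    have ha' : a = k := List.eq_of_mem_replicate ha
    obtain ⟨v, hv, hb'⟩ := List.mem_flatMap.mp hb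
    have hb'' : b = v := List.eq_of_mem_replicate hb'
    subst ha'; subst hb''
    exact le_of_lt ((List.pairwise_cons.mp hp).1 _ hv)

-- sorted S is exactly the flattened blocks over the sorted distinct values
theorem pv_sorted_eq_flat (S : List Int) :
    PySem.List.sorted S (fun x => x) false
      = (PySem.List.sorted (PySem.Set.ofList S) (fun x => x) false).flatMap
          (fun v => List.replicate (S.count v) v) := by
  set K := PySem.List.sorted (PySem.Set.ofList S) (fun x => x) false with hK
  have hnd : K.Nodup :=
    (PySem.List.sorted_perm (PySem.Set.ofList S) (fun x => x) false).nodup_iff.mpr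
      (PySem.Set.nodup_ofList S)
  have hm : ∀ x, x ∈ K ↔ x ∈ S := by
    intro x
    rw [hK, PySem.List.mem_sorted, PySem.Set.mem_ofList]
  exact PySem.List.sorted_id_eq_of_perm_of_pairwise S _
    (pv_flat_perm S K hnd hm)
    (pv_flat_pairwise S K (PySem.List.sorted_ofList_pairwise_lt S))

-- ===== VERDICT (by name: the statement is the Claim_ definition above) =====
theorem calc_py_spec : Claim_equal_calc_py := by
  intro S _
  show calc_py S = calc_py_alt S
  simp only [calc_py, calc_py_alt]
  rw [PySem.Dict.foldl_insert_getD_add_one_eq_counter]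
  simp only [PySem.Dict.getD_counter, PySem.Dict.keys_counter]
  rw [show (S.length : Int) = PySem.List.len (PySem.List.sorted S (fun x => x) false) by
        simp [PySem.List.len, PySem.List.length_sorted],
      PySem.List.foldl_pyRange_zero_pyGetD (PySem.List.sorted S (fun x => x) false) 0
        (fun c x => if x ≥ c + 1 then c + 1 else c) 0]
  rw [pv_sorted_eq_flat S, pv_flat_foldl]
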